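-- pv_equiv track=rewrite | github.com/ai4data/mzcode | metazcode/sdk/ingestion/ssis/sql_semantics.py | _split_select_columns
-- ===== SOURCE A (Python) =====
-- from typing import Dict, List, Optional, Tuple, Any
--
-- def _split_select_columns(select_clause: str) -> List[str]:
--     """Split SELECT clause by commas, handling nested parentheses."""
--     columns = []
--     current_column = ""
--     paren_depth = 0
--
--     for char in select_clause:
--         if char == '(':
--             paren_depth += 1
--         elif char == ')':
--             paren_depth -= 1
--         elif char == ',' and paren_depth == 0:
--             columns.append(current_column.strip())
--             current_column = ""
--             continue
--
--         current_column += char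
--
--     # Add the last column
--     if current_column.strip():
--         columns.append(current_column.strip())
--
--     return columns
-- ===== SOURCE B (Python) =====
-- from typing import List
--
-- def _split_select_columns(select_clause: str) -> List[str]:
--     """Split SELECT clause by commas, handling nested parentheses."""
--     segments = select_clause.split(',')
--     columns = []
--     buffer = []
--     balance = 0
--
--     for seg in segments[:-1]:
--         buffer.append(seg)
--         balance += seg.count('(') - seg.count(')')
--         if balance == 0:
--             columns.append(','.join(buffer).strip())
--             buffer = []
--
--     buffer.append(segments[-1])
--     last = ','.join(buffer).strip()
--     if last:
--         columns.append(last)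
--
--     return columns
-- ===== Notes on version B (the rewrite author's own statement) =====
-- stated objective: faster
-- what changed: Replaces the character-by-character scan that rebuilds current_column one character at a time with a single comma split followed by a segment-level pass keeping a running parenthesis balance, emitting a joined-and-stripped group whenever the balance returns to zero.
import Mathlib
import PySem

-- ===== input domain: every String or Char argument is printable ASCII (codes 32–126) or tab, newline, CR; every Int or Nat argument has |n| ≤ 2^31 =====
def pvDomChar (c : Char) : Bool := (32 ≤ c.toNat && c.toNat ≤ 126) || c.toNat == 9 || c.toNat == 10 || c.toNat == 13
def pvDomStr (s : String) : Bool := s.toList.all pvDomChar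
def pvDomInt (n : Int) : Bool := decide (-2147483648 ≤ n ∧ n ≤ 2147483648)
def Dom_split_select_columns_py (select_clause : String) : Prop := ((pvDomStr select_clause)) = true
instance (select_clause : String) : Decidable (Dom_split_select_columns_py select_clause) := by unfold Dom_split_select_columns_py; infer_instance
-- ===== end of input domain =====

-- B replaces A's per-character scan (which rebuilds current_column one character at a time) with
-- a single comma split plus a segment-level pass on a running parenthesis balance (objective: faster).

-- ===== PORT A =====
-- A's loop body: state (columns, current_column, paren_depth), one step per character.
def aStep (st : List (List Char) × List Char × Int) (c : Char) :
    List (List Char) × List Char × Int :=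
  let cols := st.1
  let cur := st.2.1
  let d := st.2.2
  if c = '(' then (cols, cur ++ [c], d + 1)
  else if c = ')' then (cols, cur ++ [c], d - 1)
  else if c = ',' ∧ d = 0 then (cols ++ [PySem.Chars.strip cur], [], d)
  else (cols, cur ++ [c], d)

-- A's post-loop "add the last column" block.
def finishA (st : List (List Char) × List Char × Int) : List (List Char) :=
  if PySem.Chars.strip st.2.1 ≠ [] then st.1 ++ [PySem.Chars.strip st.2.1] else st.1

def split_select_columns_py (select_clause : String) : List String :=
  (finishA (select_clause.toList.foldl aStep ([], [], 0))).map String.mk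

-- ===== PORT B =====
-- B's loop body: state (columns, buffer, balance), one step per comma-separated segment.
def bStep (st : List (List Char) × List (List Char) × Int) (seg : List Char) :
    List (List Char) × List (List Char) × Int :=
  let cols := st.1
  let buf := st.2.1 ++ [seg]
  let bal := st.2.2 + ((seg.count '(' : Int) - (seg.count ')' : Int))
  if bal = 0 then (cols ++ [PySem.Chars.strip (PySem.Chars.join [','] buf)], [], bal)
  else (cols, buf, bal)

-- B's final flush of the buffer together with the last segment.
def finishB (lastSeg : List Char) (st : List (List Char) × List (List Char) × Int) :
    List (List Char) :=
  let last := PySem.Chars.strip (PySem.Chars.join [','] (st.2.1 ++ [lastSeg]))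
  if last ≠ [] then st.1 ++ [last] else st.1

def split_select_columns_py_alt (select_clause : String) : List String :=
  let segs := select_clause.toList.splitOn ','
  (finishB (segs.getLast?.getD []) (segs.dropLast.foldl bStep ([], [], 0))).map String.mk

-- ===== PRECONDITION & SPEC =====
def Spec_split_select_columns_py (select_clause : String) (out : List String) : Prop := out = split_select_columns_py_alt select_clause
instance (select_clause : String) (out : List String) : Decidable (Spec_split_select_columns_py select_clause out) := by unfold Spec_split_select_columns_py; infer_instance

-- ===== CLAIM (what is proved, stated in full; the proofs are below) =====
def Claim_equal_split_select_columns_py : Prop := ∀ (select_clause : String), Dom_split_select_columns_py select_clause → Spec_split_select_columns_py select_clause (split_select_columns_py select_clause)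

-- ===== LEMMAS AND PROOFS =====

-- A's current_column at a segment boundary: the buffered segments re-joined, plus the pending ','.
def pend (buf : List (List Char)) : List Char :=
  if buf = [] then [] else PySem.Chars.join [','] buf ++ [',']

theorem pend_nil : pend [] = [] := rfl

theorem join_snoc (buf : List (List Char)) (seg : List Char) :
    PySem.Chars.join [','] (buf ++ [seg]) = pend buf ++ seg := by
  induction buf with
  | nil => simp [pend, PySem.Chars.join_singleton]
  | cons a buf ih =>
    cases buf with
    | nil =>
      simp [pend, PySem.Chars.join_cons_cons, PySem.Chars.join_singleton]
    | cons b rest =>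
      rw [show ((a :: b :: rest) ++ [seg]) = a :: (b :: (rest ++ [seg])) from rfl]
      rw [PySem.Chars.join_cons_cons]
      rw [show (b :: (rest ++ [seg])) = ((b :: rest) ++ [seg]) from rfl, ih]
      simp [pend, PySem.Chars.join_cons_cons]

theorem pend_snoc (buf : List (List Char)) (seg : List Char) :
    pend (buf ++ [seg]) = pend buf ++ seg ++ [','] := by
  have h : buf ++ [seg] ≠ [] := by simp
  rw [show pend (buf ++ [seg]) = PySem.Chars.join [','] (buf ++ [seg]) ++ [','] from by
    simp [pend, h]]
  rw [join_snoc]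

theorem foldl_aStep_comma_free (seg : List Char) :
    ∀ (cols : List (List Char)) (cur : List Char) (d : Int), ',' ∉ seg →
    seg.foldl aStep (cols, cur, d)
      = (cols, cur ++ seg, d + ((seg.count '(' : Int) - (seg.count ')' : Int))) := by
  induction seg with
  | nil => intro cols cur d _; simp
  | cons c rest ih =>
    intro cols cur d h
    have hc : c ≠ ',' := by intro hh; exact h (by simp [hh])
    have hr : ',' ∉ rest := fun hh => h (List.mem_cons_of_mem _ hh)
    simp only [List.foldl_cons]
    by_cases h1 : c = '('
    · subst h1
      rw [show aStep (cols, cur, d) '(' = (cols, cur ++ ['('], d + 1) from rfl]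
      rw [ih cols (cur ++ ['(']) (d + 1) hr]
      refine Prod.ext rfl (Prod.ext (by simp) ?_)
      simp
      omega
    · by_cases h2 : c = ')'
      · subst h2
        rw [show aStep (cols, cur, d) ')' = (cols, cur ++ [')'], d - 1) from by
          simp [aStep]]
        rw [ih cols (cur ++ [')']) (d - 1) hr]
        refine Prod.ext rfl (Prod.ext (by simp) ?_)
        simp
        omega
      · rw [show aStep (cols, cur, d) c = (cols, cur ++ [c], d) from by
          simp [aStep, h1, h2, hc]]
        rw [ih cols (cur ++ [c]) d hr]
        refine Prod.ext rfl (Prod.ext (by simp) ?_)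
        simp [h1, h2]

theorem aStep_comma_emit (cols : List (List Char)) (cur : List Char) :
    aStep (cols, cur, 0) ',' = (cols ++ [PySem.Chars.strip cur], [], 0) := by
  simp [aStep]

theorem aStep_comma_keep (cols : List (List Char)) (cur : List Char) (d : Int) (hd : d ≠ 0) :
    aStep (cols, cur, d) ',' = (cols, cur ++ [','], d) := by
  simp [aStep, hd]

theorem splitOnP_no_sep {α : Type} (p : α → Bool) (xs : List α) :
    ∀ l ∈ xs.splitOnP p, ∀ x ∈ l, p x = false := by
  induction xs with
  | nil =>
    intro l hl x hx
    rw [List.splitOnP_nil] at hl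
    simp at hl
    subst hl
    simp at hx
  | cons a xs ih =>
    intro l hl x hx
    rw [List.splitOnP_cons] at hl
    by_cases hp : p a
    · rw [if_pos hp] at hl
      rcases List.mem_cons.mp hl with h | h
      · subst h; simp at hx
      · exact ih l h x hx
    · rw [if_neg hp] at hl
      rcases hEq : xs.splitOnP p with _ | ⟨y, ys⟩
      · exact absurd hEq (List.splitOnP_ne_nil p xs)
      · rw [hEq] at hl
        simp only [List.modifyHead] at hl
        rcases List.mem_cons.mp hl with h | h
        · subst h
          rcases List.mem_cons.mp hx with h2 | h2
          · subst h2; simpa using hp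
          · exact ih y (hEq ▸ List.mem_cons_self) x h2
        · exact ih l (hEq ▸ List.mem_cons_of_mem _ h) x hx

theorem comma_free (xs : List Char) : ∀ l ∈ xs.splitOn ',', ',' ∉ l := by
  intro l hl hx
  have := splitOnP_no_sep (· == ',') xs l (by simpa [List.splitOn] using hl) ',' hx
  simp at this

theorem main_lemma :
    ∀ (segs : List (List Char)), segs ≠ [] → (∀ l ∈ segs, ',' ∉ l) →
    ∀ (cols buf : List (List Char)) (bal : Int),
    finishA ((PySem.Chars.join [','] segs).foldl aStep (cols, pend buf, bal))
      = finishB ((segs.getLast?).getD []) (segs.dropLast.foldl bStep (cols, buf, bal)) := by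
  intro segs
  induction segs with
  | nil => intro h; exact absurd rfl h
  | cons seg rest ih =>
    intro _ hfree cols buf bal
    have hseg : ',' ∉ seg := hfree seg (by simp)
    cases rest with
    | nil =>
      rw [PySem.Chars.join_singleton]
      rw [foldl_aStep_comma_free seg cols (pend buf) bal hseg]
      simp [finishA, finishB, join_snoc]
    | cons r rest' =>
      have hrest : (r :: rest') ≠ [] := by simp
      have hfree' : ∀ l ∈ (r :: rest'), ',' ∉ l := fun l hl => hfree l (List.mem_cons_of_mem _ hl)
      rw [PySem.Chars.join_cons_cons]
      rw [List.foldl_append, List.foldl_append]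
      rw [foldl_aStep_comma_free seg cols (pend buf) bal hseg]
      simp only [List.foldl_cons, List.foldl_nil]
      rw [show (seg :: r :: rest').dropLast = seg :: (r :: rest').dropLast from rfl]
      rw [show (seg :: r :: rest').getLast? = (r :: rest').getLast? from List.getLast?_cons_cons ..]
      simp only [List.foldl_cons]
      by_cases hb : bal + ((seg.count '(' : Int) - (seg.count ')' : Int)) = 0
      · rw [hb, aStep_comma_emit]
        rw [show bStep (cols, buf, bal) seg
              = (cols ++ [PySem.Chars.strip (PySem.Chars.join [','] (buf ++ [seg]))], [], (0 : Int)) from by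
          simp [bStep, hb]]
        have := ih hrest hfree'
          (cols ++ [PySem.Chars.strip (pend buf ++ seg)]) [] 0
        rw [pend_nil] at this
        rw [this, join_snoc]
      · rw [aStep_comma_keep _ _ _ hb]
        rw [show bStep (cols, buf, bal)  seg
              = (cols, buf ++ [seg], bal + ((seg.count '(' : Int) - (seg.count ')' : Int))) from by
          simp [bStep, hb]]
        have := ih hrest hfree' cols (buf ++ [seg])
          (bal + ((seg.count '(' : Int) - (seg.count ')' : Int)))
        rw [pend_snoc] at this
        exact this

-- ===== VERDICT (by name: the statement is the Claim_ definition above) =====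
theorem split_select_columns_py_spec : Claim_equal_split_select_columns_py := by
  intro s _
  unfold Spec_split_select_columns_py
  simp only [split_select_columns_py, split_select_columns_py_alt]
  have hne : s.toList.splitOn ',' ≠ [] := List.splitOnP_ne_nil _ _
  have hjoin : PySem.Chars.join [','] (s.toList.splitOn ',') = s.toList :=
    List.intercalate_splitOn s.toList ','
  have := main_lemma (s.toList.splitOn ',') hne (comma_free s.toList) [] [] 0
  rw [pend_nil, hjoin] at this
  rw [this]
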